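-- pv_equiv track=rewrite | github.com/imfl/python-snippets | mdd/mdd.py | mdd
-- ===== SOURCE A (Python) =====
-- def mdd(p):
--     m = []
--     peak = 0
--     mdd_so_far = 0
--     for i in range(len(p)):
--         if p[i] > peak:
--             peak = p[i]
--         if peak - p[i] > mdd_so_far:
--             mdd_so_far = peak - p[i]
--         m.append(mdd_so_far)
--     return m
-- ===== SOURCE B (Python) =====
-- def mdd(p):
--     # brute force from the definition, no running accumulators:
--     # dd[j] = 0-seeded peak of p[:j+1], minus p[j]; answer i = max of the prefix dd[:i+1]
--     dd = [max([0] + p[:j + 1]) - p[j] for j in range(len(p))]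
--     return [max(dd[:i + 1]) for i in range(len(p))]
-- ===== Notes on version B (the rewrite author's own statement) =====
-- stated objective: alternative
-- what changed: Replaces A's single online loop carrying two scalar accumulators (peak, mdd_so_far) with an accumulator-free brute force from the definition: build the drawdown list dd[j] = (0-seeded peak of p[:j+1]) minus p[j] by recomputing each peak from scratch, then answer each prefix with max(dd[:i+1]); trades A's O(n) incremental scan for quadratic recomputation.
import Mathlib
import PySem

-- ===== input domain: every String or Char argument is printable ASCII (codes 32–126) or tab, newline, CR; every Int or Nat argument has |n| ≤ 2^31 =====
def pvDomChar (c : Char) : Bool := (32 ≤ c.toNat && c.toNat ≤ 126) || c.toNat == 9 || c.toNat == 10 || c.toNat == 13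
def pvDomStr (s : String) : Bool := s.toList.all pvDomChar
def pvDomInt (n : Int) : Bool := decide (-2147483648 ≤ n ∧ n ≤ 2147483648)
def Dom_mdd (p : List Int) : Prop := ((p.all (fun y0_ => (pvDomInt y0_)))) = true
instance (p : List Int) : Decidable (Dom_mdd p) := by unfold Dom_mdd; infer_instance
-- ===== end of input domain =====

-- B replaces A's fused online loop (two scalar accumulators) by the direct
-- per-prefix definition, recomputing for each i the max over j ≤ i of the
-- 0-seeded peak of p[:j+1] minus p[j]
-- (alternative decomposition; B is slower, not faster).


-- ===== PORT A =====
-- A's loop over i in range(len(p)) reading p[i], tracking peak and mdd_so_far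
-- and appending mdd_so_far, as the obvious structural recursion over p.
def mddLoop (p : List Int) (peak mddSoFar : Int) : List Int :=
  match p with
  | [] => []
  | x :: xs =>
    let peak' := if x > peak then x else peak
    let dd' := if peak' - x > mddSoFar then peak' - x else mddSoFar
    dd' :: mddLoop xs peak' dd'

def mdd (p : List Int) : List Int := mddLoop p 0 0

-- ===== PORT B =====
-- the 0-seeded prefix peak of Source B; the max? list is never empty, so .getD 0 is never hit
def peakAtB (p : List Int) (j : Int) : Int :=
  (PySem.List.max? ((0 : Int) :: PySem.List.slice p none (some (j + 1))) (fun y => y)).getD 0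

-- Source B's dd list: 0-seeded prefix peak minus p[j], for each j
def ddB (p : List Int) : List Int :=
  (PySem.List.pyRange 0 (PySem.List.len p) 1).map
    (fun j => peakAtB p j - PySem.List.pyGetD p j 0)

-- Source B's result: the max of each prefix slice dd[:i+1]; each such slice
-- is nonempty (i ≥ 0, i < len(p)), so the .getD 0 after max? is never hit
def mdd_alt (p : List Int) : List Int :=
  let dd := ddB p
  (PySem.List.pyRange 0 (PySem.List.len p) 1).map (fun i =>
    (PySem.List.max? (PySem.List.slice dd none (some (i + 1))) (fun y => y)).getD 0)

-- ===== PRECONDITION & SPEC =====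
def Spec_mdd (p : List Int) (out : List Int) : Prop := out = mdd_alt p
instance (p : List Int) (out : List Int) : Decidable (Spec_mdd p out) := by unfold Spec_mdd; infer_instance

-- ===== CLAIM (what is proved, stated in full; the proofs are below) =====
def Claim_equal_mdd : Prop := ∀ (p : List Int), Dom_mdd p → Spec_mdd p (mdd p)

-- ===== LEMMAS AND PROOFS =====

-- proof-side drawdown at index j with an arbitrary starting peak
def ddAt (p : List Int) (peak : Int) (j : Nat) : Int :=
  (p.take (j + 1)).foldl max peak - p.getD j 0

-- A's loop equals the per-prefix brute-force maxima
theorem mddLoop_eq (p : List Int) : ∀ (peak dd : Int),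
    mddLoop p peak dd =
      (List.range p.length).map
        (fun i => ((List.range (i + 1)).map (ddAt p peak)).foldl max dd) := by
  induction p with
  | nil => intro peak dd; rfl
  | cons x xs ih =>
    intro peak dd
    have hpk : (if x > peak then x else peak) = max peak x := by split <;> omega
    have hdd0 : ddAt (x :: xs) peak 0 = max peak x - x := by
      simp [ddAt]
    have hdd' : (if max peak x - x > dd then max peak x - x else dd) = max dd (max peak x - x) := by
      split <;> omega
    simp only [mddLoop, hpk, hdd', List.length_cons]
    rw [List.range_succ_eq_map, List.map_cons, List.map_map, ih]
    congr 1
    symm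
    apply List.map_congr_left
    intro i _
    show ((List.range (i + 1 + 1)).map (ddAt (x :: xs) peak)).foldl max dd
      = ((List.range (i + 1)).map (ddAt xs (max peak x))).foldl max (max dd (max peak x - x))
    rw [List.range_succ_eq_map, List.map_cons, List.map_map]
    simp only [List.foldl_cons, hdd0]
    congr 1

theorem peakAtB_natCast (p : List Int) (j : Nat) :
    peakAtB p (j : Int) = (p.take (j + 1)).foldl max 0 := by
  have : ((j : Int) + 1) = ((j + 1 : Nat) : Int) := by push_cast; ring
  rw [peakAtB, this, PySem.List.slice_to_natCast, PySem.List.max?_id_cons]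
  rfl

theorem ddAt_zero_nonneg (p : List Int) : 0 ≤ ddAt p 0 0 := by
  cases p with
  | nil => simp [ddAt]
  | cons x xs => simp [ddAt]

-- the dd list is the pointwise brute-force drawdown
theorem ddB_eq (p : List Int) : ddB p = (List.range p.length).map (ddAt p 0) := by
  have hlen : PySem.List.len p = (p.length : Int) := by simp [PySem.List.len]
  rw [ddB, hlen, PySem.List.pyRange_zero_nat, List.map_map]
  apply List.map_congr_left
  intro j _
  show peakAtB p (j : Int) - PySem.List.pyGetD p (j : Int) 0 = ddAt p 0 j
  rw [peakAtB_natCast, PySem.List.pyGetD_natCast]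
  rfl

-- B equals the same per-prefix brute-force maxima (with peak baseline 0)
theorem mdd_alt_eq (p : List Int) :
    mdd_alt p = (List.range p.length).map
      (fun i => ((List.range (i + 1)).map (ddAt p 0)).foldl max 0) := by
  have hlen : PySem.List.len p = (p.length : Int) := by simp [PySem.List.len]
  rw [mdd_alt]
  show (PySem.List.pyRange 0 (PySem.List.len p) 1).map _ = _
  rw [hlen, PySem.List.pyRange_zero_nat, List.map_map]
  apply List.map_congr_left
  intro k hk
  have hkn : k < p.length := List.mem_range.mp hk
  have h1 : ((k : Int) + 1) = ((k + 1 : Nat) : Int) := by push_cast; ring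
  show (PySem.List.max? (PySem.List.slice (ddB p) none (some ((k : Int) + 1))) _).getD 0 = _
  rw [h1, PySem.List.slice_to_natCast, ddB_eq, ← List.map_take, List.take_range,
    min_eq_left (by omega : k + 1 ≤ p.length), List.range_succ_eq_map, List.map_cons,
    PySem.List.max?_id_cons]
  simp only [Option.getD_some, List.foldl_cons]
  rw [max_eq_right (ddAt_zero_nonneg p)]

-- ===== VERDICT (by name: the statement is the Claim_ definition above) =====
theorem mdd_spec : Claim_equal_mdd := by
  intro p _
  show mdd p = mdd_alt p
  rw [mdd, mddLoop_eq, mdd_alt_eq]
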